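-- pv_equiv track=rewrite | github.com/daniel-reich/ubiquitous-fiesta | 6FaERG8x8Y6MYmoYF_22.py | dice_score
-- ===== SOURCE A (Python) =====
-- def dice_score(throw):
--     s={}
--     throw.sort()
--     for i in throw:
--         s[i]= throw.count(i)
--     sum=0
--     for key,val in s.items():
--       if key == 1 and val ==3:
--           sum = sum+1000
--       elif key ==1:
--           sum = sum+val*100
--       elif key ==5:
--           sum = sum + val*50
--       elif key in [2,3,4,5,6] and val ==3:
--           sum = sum + key*100
--     return sum
-- ===== SOURCE B (Python) =====
-- def dice_score(throw):
--     throw.sort()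
--     total = 0
--     i = 0
--     n = len(throw)
--     while i < n:
--         j = i + 1
--         while j < n and throw[j] == throw[i]:
--             j += 1
--         d, c = throw[i], j - i
--         if d == 1:
--             total += 1000 if c == 3 else c * 100
--         elif d == 5:
--             total += c * 50
--         elif d in (2, 3, 4, 6) and c == 3:
--             total += d * 100
--         i = j
--     return total
-- ===== Notes on version B (the rewrite author's own statement) =====
-- stated objective: faster
-- what changed: B replaces A's dict-of-counts plus items loop (each element re-scanned by throw.count) with a single run-length scan over the sorted list: two indices walk each maximal run of equal faces once and score the run directly, so no frequency table and no counting scans exist at all.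
import Mathlib
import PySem

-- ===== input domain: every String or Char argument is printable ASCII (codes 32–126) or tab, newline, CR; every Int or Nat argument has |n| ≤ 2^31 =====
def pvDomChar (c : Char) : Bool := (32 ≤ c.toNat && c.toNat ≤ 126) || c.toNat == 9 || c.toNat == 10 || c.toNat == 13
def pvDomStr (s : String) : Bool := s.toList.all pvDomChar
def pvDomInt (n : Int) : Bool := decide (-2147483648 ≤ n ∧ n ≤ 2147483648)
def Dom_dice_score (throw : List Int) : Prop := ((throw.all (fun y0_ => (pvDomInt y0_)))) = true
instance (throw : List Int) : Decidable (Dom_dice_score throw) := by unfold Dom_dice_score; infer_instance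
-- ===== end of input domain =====

-- B replaces A's frequency dictionary and items loop with one run-length scan over the sorted
-- list, scoring each maximal run of an equal face directly (a different algorithm; measured faster).
-- Both A and B sort the argument in place in Python; the equivalence proved here is about the
-- RETURN value (B performs the same mutation).

-- ===== PORT A =====
def dice_score (throw : List Int) : Int :=
  let t := PySem.List.sorted throw (fun x => x) false
  let s := t.foldl (fun d i => d.insert i ((PySem.List.count t i : Int))) PySem.Dict.empty
  s.items.foldl (fun sum kv =>
    if kv.1 = 1 ∧ kv.2 = 3 then sum + 1000
    else if kv.1 = 1 then sum + kv.2 * 100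
    else if kv.1 = 5 then sum + kv.2 * 50
    else if kv.1 ∈ ([2,3,4,5,6] : List Int) ∧ kv.2 = 3 then sum + kv.1 * 100
    else sum) 0

-- ===== PORT B =====
-- scoring of one run of face d with multiplicity c (Source B's if/elif chain)
def runScore (d c : Int) : Int :=
  if d = 1 then (if c = 3 then 1000 else c * 100)
  else if d = 5 then c * 50
  else if d ∈ ([2,3,4,6] : List Int) ∧ c = 3 then d * 100
  else 0

-- Source B's outer while loop: consume one maximal run (the inner while advancing j), score it, continue
def runsGo (t : List Int) : Int :=
  match t with
  | [] => 0
  | x :: xs =>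
    let run := xs.takeWhile (fun y => y == x)
    let rest := xs.dropWhile (fun y => y == x)
    runScore x (1 + (run.length : Int)) + runsGo rest
termination_by t.length
decreasing_by
  exact Nat.lt_succ_of_le (List.length_dropWhile_le _ _)

def dice_score_alt (throw : List Int) : Int :=
  let t := PySem.List.sorted throw (fun x => x) false
  runsGo t

-- ===== PRECONDITION & SPEC =====
def Spec_dice_score (throw : List Int) (out : Int) : Prop := out = dice_score_alt throw
instance (throw : List Int) (out : Int) : Decidable (Spec_dice_score throw out) := by unfold Spec_dice_score; infer_instance

-- ===== CLAIM (what is proved, stated in full; the proofs are below) =====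
def Claim_equal_dice_score : Prop := ∀ (throw : List Int), Dom_dice_score throw → Spec_dice_score throw (dice_score throw)

-- ===== LEMMAS AND PROOFS =====

-- the per-item contribution of A's second loop
def ggContrib (p : Int × Int) : Int :=
  if p.1 = 1 ∧ p.2 = 3 then 1000
  else if p.1 = 1 then p.2 * 100
  else if p.1 = 5 then p.2 * 50
  else if p.1 ∈ ([2,3,4,5,6] : List Int) ∧ p.2 = 3 then p.1 * 100
  else 0

theorem runScore_eq_ggContrib (d c : Int) : runScore d c = ggContrib (d, c) := by
  unfold runScore ggContrib
  split_ifs <;> simp_all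

theorem ggContrib_zero (x : Int) : ggContrib (x, 0) = 0 := by
  unfold ggContrib
  split_ifs <;> simp_all

theorem ggContrib_zero_out (x : Int) (v : Int)
    (h : x ∉ ({1, 2, 3, 4, 5, 6} : Finset Int)) : ggContrib (x, v) = 0 := by
  simp only [Finset.mem_insert, Finset.mem_singleton] at h
  push Not at h
  obtain ⟨h1, h2, h3, h4, h5, h6⟩ := h
  unfold ggContrib
  simp [h1, h2, h3, h4, h5, h6]

-- getD of a fold inserting a value depending only on the key
theorem getD_foldl_insert_const (f : Int → Int) (l : List Int) (d : PySem.Dict Int Int)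
    (k : Int) (h : k ∈ l ∨ d.getD k 0 = f k) :
    (l.foldl (fun d i => d.insert i (f i)) d).getD k 0 = f k := by
  induction l generalizing d with
  | nil => simpa using h.resolve_left (by simp)
  | cons x xs ih =>
    simp only [List.foldl_cons]
    apply ih
    by_cases hk : k = x
    · subst hk; right; simp [PySem.Dict.getD_insert_self]
    · rcases h with h | h
      · rcases List.mem_cons.mp h with h' | h'
        · exact absurd h' hk
        · exact Or.inl h'
      · right; rw [PySem.Dict.getD_insert]; simp [hk]; exact h

-- the items of A's dictionary: distinct elements paired with their counts
theorem items_dice_dict (t : List Int) :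
    (t.foldl (fun d i => d.insert i ((PySem.List.count t i : Int))) PySem.Dict.empty).items
      = (PySem.Set.ofList t).map (fun k => (k, (PySem.List.count t k : Int))) := by
  set D := t.foldl (fun d i => d.insert i ((PySem.List.count t i : Int))) PySem.Dict.empty with hD
  have hkeys : D.keys = PySem.Set.ofList t := by
    rw [hD, PySem.Dict.keys_foldl_insert]
    simp [PySem.Dict.keys_empty, PySem.Set.update_nil_left]
  have hnd : D.keys.Nodup := by rw [hkeys]; exact PySem.Set.nodup_ofList t
  rw [PySem.Dict.items_eq_map_keys D hnd 0, hkeys]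
  apply List.map_congr_left
  intro k hk
  have : D.getD k 0 = (PySem.List.count t k : Int) := by
    rw [hD]
    exact getD_foldl_insert_const _ _ _ _ (Or.inl ((PySem.Set.mem_ofList t k).mp hk))
  rw [this]

theorem foldl_gg (l : List (Int × Int)) :
    (l.foldl (fun sum kv =>
      if kv.1 = 1 ∧ kv.2 = 3 then sum + 1000
      else if kv.1 = 1 then sum + kv.2 * 100
      else if kv.1 = 5 then sum + kv.2 * 50
      else if kv.1 ∈ ([2,3,4,5,6] : List Int) ∧ kv.2 = 3 then sum + kv.1 * 100
      else sum) 0) = (l.map ggContrib).sum := by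
  have h : (fun (sum : Int) (kv : Int × Int) =>
      if kv.1 = 1 ∧ kv.2 = 3 then sum + 1000
      else if kv.1 = 1 then sum + kv.2 * 100
      else if kv.1 = 5 then sum + kv.2 * 50
      else if kv.1 ∈ ([2,3,4,5,6] : List Int) ∧ kv.2 = 3 then sum + kv.1 * 100
      else sum) = fun sum kv => sum + ggContrib kv := by
    funext s kv
    unfold ggContrib
    split_ifs <;> ring
  rw [h, PySem.List.foldl_add]
  ring

-- sum over the distinct elements = sum over the six faces (everything else contributes 0)
theorem sum_toFinset_eq_sum_faces (t : List Int) :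
    (∑ k ∈ t.toFinset, ggContrib (k, (PySem.List.count t k : Int)))
      = ∑ k ∈ ({1, 2, 3, 4, 5, 6} : Finset Int), ggContrib (k, (PySem.List.count t k : Int)) := by
  set G : Int → Int := fun k => ggContrib (k, (PySem.List.count t k : Int)) with hG
  set s := t.toFinset with hs
  set F : Finset Int := {1, 2, 3, 4, 5, 6} with hF
  have e1 : ∑ k ∈ s, G k = ∑ k ∈ s ∩ F, G k := by
    refine (Finset.sum_subset Finset.inter_subset_left ?_).symm
    intro x _ hx
    have hxF : x ∉ F := fun hc => hx (Finset.mem_inter.mpr ⟨by assumption, hc⟩)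
    exact ggContrib_zero_out x _ hxF
  have e2 : ∑ k ∈ F, G k = ∑ k ∈ s ∩ F, G k := by
    refine (Finset.sum_subset Finset.inter_subset_right ?_).symm
    intro x hxF hx
    have hxs : x ∉ s := fun hc => hx (Finset.mem_inter.mpr ⟨hc, hxF⟩)
    have hxt : x ∉ t := fun hc => hxs (by simp [hs, List.mem_toFinset, hc])
    have hcnt : PySem.List.count t x = 0 := by
      simp [PySem.List.count, List.count_eq_zero, hxt]
    simp only [hG, hcnt]
    exact ggContrib_zero x
  rw [e1, ← e2]

-- on a sorted list, the elements left after dropping the leading run of x are all > x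
theorem dropWhile_gt (x : Int) (xs : List Int)
    (hlb : ∀ y ∈ xs, x ≤ y) (hp : xs.Pairwise (· ≤ ·)) :
    ∀ z ∈ xs.dropWhile (fun y => y == x), x < z := by
  induction xs with
  | nil => simp
  | cons y ys ih =>
    intro z hz
    by_cases hyx : y = x
    · rw [List.dropWhile_cons_of_pos (by simp [hyx])] at hz
      exact ih (fun w hw => hlb w (List.mem_cons_of_mem _ hw)) hp.tail z hz
    · rw [List.dropWhile_cons_of_neg (by simp [hyx])] at hz
      have hxy : x < y := lt_of_le_of_ne (hlb y (List.mem_cons_self)) (Ne.symm hyx)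
      rcases List.mem_cons.mp hz with rfl | hz'
      · exact hxy
      · exact lt_of_lt_of_le hxy ((List.pairwise_cons.mp hp).1 z hz')

-- B's run-length scan on a sorted list = sum of contributions over the distinct elements
theorem runsGo_eq (t : List Int) : t.Pairwise (· ≤ ·) →
    runsGo t = ∑ k ∈ t.toFinset, ggContrib (k, (PySem.List.count t k : Int)) := by
  induction t using runsGo.induct with
  | case1 => intro _; simp [runsGo]
  | case2 x xs rest ih =>
    intro hp
    set run := xs.takeWhile (fun y => y == x) with hrundef
    have hlb : ∀ y ∈ xs, x ≤ y := (List.pairwise_cons.mp hp).1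
    have hgt : ∀ z ∈ rest, x < z := dropWhile_gt x xs hlb hp.tail
    have hxrest : x ∉ rest := fun hx => lt_irrefl x (hgt x hx)
    have hrun : ∀ y ∈ run, y = x := by
      intro y hy
      have := List.mem_takeWhile_imp hy
      simpa using this
    have hsplit : run ++ rest = xs := List.takeWhile_append_dropWhile
    have hprest : rest.Pairwise (· ≤ ·) :=
      hp.tail.sublist (List.dropWhile_sublist _)
    -- count facts
    have hcx : (x :: xs).count x = 1 + run.length := by
      rw [← hsplit, List.count_cons, List.count_append]
      have h1 : run.count x = run.length := List.count_eq_length.mpr (fun b hb => ((hrun b hb).symm ▸ rfl))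
      have h2 : rest.count x = 0 := List.count_eq_zero.mpr hxrest
      simp [h1, h2]; omega
    have hck : ∀ k ∈ rest, (x :: xs).count k = rest.count k := by
      intro k hk
      have hkx : k ≠ x := fun h => hxrest (h ▸ hk)
      rw [← hsplit, List.count_cons, List.count_append]
      have h1 : run.count k = 0 := List.count_eq_zero.mpr (fun hkr => hkx (hrun k hkr))
      simp [h1]
      exact fun h => hkx h.symm
    -- toFinset fact
    have hfs : (x :: xs).toFinset = insert x rest.toFinset := by
      rw [← hsplit]
      ext a
      simp only [List.toFinset_cons, List.toFinset_append, Finset.mem_insert, Finset.mem_union,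
        List.mem_toFinset]
      constructor
      · rintro (rfl | ha | ha)
        · exact Or.inl rfl
        · exact Or.inl (hrun a ha)
        · exact Or.inr (by simpa using ha)
      · rintro (rfl | ha)
        · exact Or.inl rfl
        · exact Or.inr (Or.inr (by simpa using ha))
    have hxnot : x ∉ rest.toFinset := by simpa using hxrest
    have hstep : runsGo (x :: xs) = runScore x (1 + (run.length : Int)) + runsGo rest := by
      rw [runsGo]
    rw [hstep, hfs, Finset.sum_insert hxnot]
    rw [runScore_eq_ggContrib, ih hprest]
    congr 1
    · congr 1
      simp only [PySem.List.count_eq, hcx]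
      push_cast; ring
    · apply Finset.sum_congr rfl
      intro k hk
      have : (x :: xs).count k = rest.count k := hck k (List.mem_toFinset.mp hk)
      simp [PySem.List.count_eq, this]

-- ===== VERDICT (by name: the statement is the Claim_ definition above) =====
theorem dice_score_spec : Claim_equal_dice_score := by
  intro throw _
  unfold Spec_dice_score dice_score dice_score_alt
  set t := PySem.List.sorted throw (fun x => x) false with ht
  have hsorted : t.Pairwise (· ≤ ·) := by
    have := PySem.List.sorted_pairwise throw (fun x => x) (κ := Int)
    simpa using this
  simp only [items_dice_dict t, foldl_gg, List.map_map]
  rw [runsGo_eq t hsorted, sum_toFinset_eq_sum_faces t]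
  have h1 : ((PySem.Set.ofList t).map
      ((fun p => ggContrib p) ∘ fun k => (k, (PySem.List.count t k : Int)))).sum
      = ∑ k ∈ (PySem.Set.ofList t).toFinset, ggContrib (k, (PySem.List.count t k : Int)) := by
    rw [List.sum_toFinset _ (PySem.Set.nodup_ofList t)]
    rfl
  rw [h1]
  have h2 : (PySem.Set.ofList t).toFinset = t.toFinset := by
    ext a
    simp [List.mem_toFinset, PySem.Set.mem_ofList]
  rw [h2, sum_toFinset_eq_sum_faces t]
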